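-- pv_equiv track=rewrite | github.com/jliversi/conway_prev_state_finder | row_set_gen.py | sqrs_to_rows
-- ===== SOURCE A (Python) =====
-- def nth_bin_dig(num, n):
--     return (num >> n) & 1
--
-- def sqrs_to_rows(num_list):
--     # first, determine the total number of bits needed
--     total_bits = 3 * len(num_list) + 6
--     row_len = total_bits // 3
--     # build up each row, starting with first 2 cols of num_list[0]
--     first = num_list[0]
--     row1 = (2 * nth_bin_dig(first, 8)) + nth_bin_dig(first, 5)
--     row2 = (2 * nth_bin_dig(first, 7)) + nth_bin_dig(first, 4)
--     row3 = (2 * nth_bin_dig(first, 6)) + nth_bin_dig(first, 3)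
--     rows = [row3, row2, row1]
--     # then add on additional digits
--     for num in num_list:
--         for i in range(3):
--             rows[i] = (rows[i] << 1) + nth_bin_dig(num,i)
--
--     # build final result
--     result = rows[0]
--     result += rows[1] << row_len
--     result += rows[2] << (row_len * 2)
--     return result
-- ===== SOURCE B (Python) =====
-- def nth_bin_dig(num, n):
--     return (num >> n) & 1
--
-- def sqrs_to_rows(num_list):
--     # One flat bit sequence (row1 seed+tail, row2 seed+tail, row3 seed+tail),
--     # then a single positional weighted sum -- no per-row integer accumulators.
--     first = num_list[0]
--     bits = []
--     for hi, lo, k in ((8, 5, 2), (7, 4, 1), (6, 3, 0)):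
--         bits.append(nth_bin_dig(first, hi))
--         bits.append(nth_bin_dig(first, lo))
--         bits.extend(nth_bin_dig(num, k) for num in num_list)
--     return sum(bit << i for i, bit in enumerate(reversed(bits)))
-- ===== Notes on version B (the rewrite author's own statement) =====
-- stated objective: alternative
-- what changed: Replaces the three shift-and-add integer accumulators threaded through the loop (plus final per-row shifts) by building one flat 0/1 bit sequence for all three rows and computing the result as a single positional weighted sum over the reversed sequence.
import Mathlib
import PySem

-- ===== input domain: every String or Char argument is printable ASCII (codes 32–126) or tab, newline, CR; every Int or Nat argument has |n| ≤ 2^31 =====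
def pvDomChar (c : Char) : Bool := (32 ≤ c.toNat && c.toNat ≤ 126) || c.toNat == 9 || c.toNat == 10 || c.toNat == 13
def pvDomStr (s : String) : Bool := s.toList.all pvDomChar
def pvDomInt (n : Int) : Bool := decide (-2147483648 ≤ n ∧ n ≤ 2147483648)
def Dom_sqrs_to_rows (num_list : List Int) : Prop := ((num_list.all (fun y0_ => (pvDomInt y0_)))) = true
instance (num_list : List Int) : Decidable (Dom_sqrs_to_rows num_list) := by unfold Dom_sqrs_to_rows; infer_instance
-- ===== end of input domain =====

-- B replaces A's three shift-and-add accumulators by one flat bit sequence summed positionally (objective: alternative decomposition, same O(n) cost).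

-- ===== PORT A =====
-- helper shared by both Pythons (both modules define the identical nth_bin_dig)
def nth_bin_dig (num : Int) (n : Nat) : Int := PySem.Int.band (num >>> n) 1

def sqrs_to_rows (num_list : List Int) : Int :=
  let total_bits : Int := 3 * (num_list.length : Int) + 6
  let row_len : Int := PySem.Int.floordiv total_bits 3
  match PySem.List.pyGet? num_list 0 with
  | none => 0   -- num_list[0] raises IndexError in Python; excluded by Pre_
  | some first =>
    let row1 : Int := 2 * nth_bin_dig first 8 + nth_bin_dig first 5
    let row2 : Int := 2 * nth_bin_dig first 7 + nth_bin_dig first 4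
    let row3 : Int := 2 * nth_bin_dig first 6 + nth_bin_dig first 3
    let rows : List Int := [row3, row2, row1]
    let rows := num_list.foldl
      (fun (rows : List Int) (num : Int) => (PySem.List.pyRange 0 3 1).foldl
        (fun (rows : List Int) (i : Int) =>
          PySem.List.pySetD rows i ((PySem.List.pyGetD rows i 0) <<< (1:Nat) + nth_bin_dig num i.toNat))
        rows)
      rows
    let result := PySem.List.pyGetD rows 0 0
    let result := result + (PySem.List.pyGetD rows 1 0) <<< row_len.toNat
    let result := result + (PySem.List.pyGetD rows 2 0) <<< (row_len * 2).toNat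
    result

-- ===== PORT B =====
def sqrs_to_rows_alt (num_list : List Int) : Int :=
  match PySem.List.pyGet? num_list 0 with
  | none => 0   -- num_list[0] raises IndexError in Python; excluded by Pre_
  | some first =>
    let bits : List Int := [(8,5,2),(7,4,1),(6,3,0)].foldl
      (fun (bits : List Int) (t : Nat × Nat × Nat) =>
        (bits ++ [nth_bin_dig first t.1, nth_bin_dig first t.2.1])
          ++ num_list.map (fun num => nth_bin_dig num t.2.2))
      []
    ((PySem.List.enumerate bits.reverse).map (fun p => p.2 <<< p.1.toNat)).sum

-- ===== PRECONDITION & SPEC =====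
-- A evaluates num_list[0]: the empty list raises IndexError (B raises too), so it is excluded.
def Pre_sqrs_to_rows (num_list : List Int) : Prop := num_list ≠ []
instance (num_list : List Int) : Decidable (Pre_sqrs_to_rows num_list) := by unfold Pre_sqrs_to_rows; infer_instance
def pvWitness_sqrs_to_rows : List Int := [5]

def Spec_sqrs_to_rows (num_list : List Int) (out : Int) : Prop := out = sqrs_to_rows_alt num_list
instance (num_list : List Int) (out : Int) : Decidable (Spec_sqrs_to_rows num_list out) := by unfold Spec_sqrs_to_rows; infer_instance

-- ===== CLAIM (what is proved, stated in full; the proofs are below) =====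
def Claim_equal_sqrs_to_rows : Prop := ∀ (num_list : List Int), Dom_sqrs_to_rows num_list → Pre_sqrs_to_rows num_list → Spec_sqrs_to_rows num_list (sqrs_to_rows num_list)

-- ===== LEMMAS AND PROOFS =====

-- the Horner step both results are built from
def hstep (acc b : Int) : Int := 2 * acc + b

-- A's inner range(3) loop on a 3-element row list, computed out
theorem loop3 (a b c num : Int) :
    (PySem.List.pyRange 0 3 1).foldl
      (fun (rows : List Int) (i : Int) =>
        PySem.List.pySetD rows i ((PySem.List.pyGetD rows i 0) <<< (1:Nat) + nth_bin_dig num i.toNat))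
      ([a, b, c] : List Int)
    = ([2*a + nth_bin_dig num 0, 2*b + nth_bin_dig num 1, 2*c + nth_bin_dig num 2] : List Int) := by
  have h3 : PySem.List.pyRange 0 3 1 = [0, 1, 2] := by decide
  rw [h3]
  simp only [List.foldl]
  norm_num [PySem.List.pySetD_of_nonneg, PySem.List.pyGetD_zero_cons, PySem.List.pyGetD_ofNat',
    Int.shiftLeft_eq, Int.toNat_zero, Int.toNat_one]
  rw [show ((2:Int).toNat) = 2 from rfl]
  norm_num [List.set]
  exact ⟨by ring, by ring, by ring⟩

-- A's outer loop leaves three independent Horner folds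
theorem a_loop (l : List Int) (x y z : Int) :
    l.foldl
      (fun (rows : List Int) (num : Int) => (PySem.List.pyRange 0 3 1).foldl
        (fun (rows : List Int) (i : Int) =>
          PySem.List.pySetD rows i ((PySem.List.pyGetD rows i 0) <<< (1:Nat) + nth_bin_dig num i.toNat))
        rows)
      ([x, y, z] : List Int)
    = ([l.foldl (fun a num => hstep a (nth_bin_dig num 0)) x,
        l.foldl (fun a num => hstep a (nth_bin_dig num 1)) y,
        l.foldl (fun a num => hstep a (nth_bin_dig num 2)) z] : List Int) := by
  induction l generalizing x y z with
  | nil => rfl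
  | cons a t ih =>
    simp only [List.foldl]
    rw [loop3, ih]
    rfl

-- shifting the Horner seed out of the fold
theorem horner_shift (g : Int → Int) (l : List Int) (x : Int) :
    l.foldl (fun a num => hstep a (g num)) x
    = x * 2 ^ l.length + l.foldl (fun a num => hstep a (g num)) 0 := by
  induction l generalizing x with
  | nil => simp
  | cons a t ih =>
    simp only [List.foldl, List.length_cons]
    rw [ih (hstep x (g a)), ih (hstep 0 (g a))]
    simp only [hstep, pow_succ]
    ring

-- B's positional sum over the reversed list is the Horner fold
theorem pos_sum_eq_horner (l : List Int) :
    ((PySem.List.enumerate l.reverse).map (fun p => p.2 <<< p.1.toNat)).sum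
    = l.foldl hstep 0 := by
  induction l with
  | nil => rfl
  | cons b t ih =>
    rw [List.reverse_cons, PySem.List.enumerate_append]
    simp only [List.map_append, List.sum_append]
    rw [ih]
    have h2 : t.foldl hstep (hstep 0 b) = hstep 0 b * 2 ^ t.length + t.foldl hstep 0 :=
      horner_shift id t (hstep 0 b)
    simp only [List.foldl, h2]
    simp only [PySem.List.enumerate_cons, PySem.List.enumerate_nil, List.map_cons, List.map_nil,
      List.sum_cons, List.sum_nil, List.length_reverse, zero_add, Int.toNat_natCast,
      Int.shiftLeft_eq, hstep]
    ring

-- the whole B-shaped Horner fold over the flat bit sequence, split into A's three rows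
theorem chain (l : List Int) (g1 g2 g3 : Int → Int) (a1 b1 a2 b2 a3 b3 : Int) :
    l.foldl (fun a num => hstep a (g3 num))
      (List.foldl hstep
        (l.foldl (fun a num => hstep a (g2 num))
          (List.foldl hstep
            (l.foldl (fun a num => hstep a (g1 num))
              (List.foldl hstep 0 [a1, b1])) [a2, b2])) [a3, b3])
    = l.foldl (fun a num => hstep a (g3 num)) (2*a3+b3)
      + (l.foldl (fun a num => hstep a (g2 num)) (2*a2+b2)) * 2 ^ (l.length+2)
      + (l.foldl (fun a num => hstep a (g1 num)) (2*a1+b1)) * 2 ^ (2*l.length+4) := by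
  simp only [List.foldl]
  rw [horner_shift g3 l, horner_shift g2 l, horner_shift g1 l,
    horner_shift g3 l (2*a3+b3), horner_shift g2 l (2*a2+b2), horner_shift g1 l (2*a1+b1)]
  simp only [hstep]
  ring

theorem rowlen (xs : List Int) :
    PySem.Int.floordiv (3 * (xs.length : Int) + 6) 3 = (xs.length : Int) + 2 := by
  rw [PySem.Int.floordiv_eq_iff_of_pos (by omega)]
  constructor <;> omega

-- ===== VERDICT (by name: the statement is the Claim_ definition above) =====
theorem sqrs_to_rows_spec : Claim_equal_sqrs_to_rows := by
  intro l _ hpre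
  unfold Spec_sqrs_to_rows
  obtain ⟨first, t, rfl⟩ := List.exists_cons_of_ne_nil hpre
  unfold sqrs_to_rows sqrs_to_rows_alt
  simp only [PySem.List.pyGet?_zero_cons]
  rw [rowlen (first :: t)]
  rw [show ((((first :: t).length : Int) + 2)).toNat = (first :: t).length + 2 from by omega]
  rw [show (((((first :: t).length : Int) + 2)) * 2).toNat = 2 * (first :: t).length + 4 from by omega]
  rw [a_loop]
  simp only [PySem.List.pyGetD_ofNat', List.getD, List.getElem?_cons_succ,
    List.getElem?_cons_zero, Option.getD_some]
  -- reduce B's literal triple fold to the flat bit list, then to the Horner fold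
  simp only [List.foldl, List.nil_append]
  rw [pos_sum_eq_horner]
  simp only [List.foldl_append, List.foldl_map]
  rw [chain (first :: t) (fun num => nth_bin_dig num 2) (fun num => nth_bin_dig num 1)
    (fun num => nth_bin_dig num 0) (nth_bin_dig first 8) (nth_bin_dig first 5)
    (nth_bin_dig first 7) (nth_bin_dig first 4) (nth_bin_dig first 6) (nth_bin_dig first 3)]
  simp only [List.foldl]
  simp only [hstep, Int.shiftLeft_eq]
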